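-- pv_equiv track=rewrite | github.com/Bongousse/AlgorithmByPython | etc/grouping_character_in_grid.py | check
-- ===== SOURCE A (Python) =====
-- def check(grid):
--     for c in ["a", "b", "c"]:
--         table = [[0 for _ in range(len(grid[0]))] for _ in range(len(grid))]
--         i, j = find_c(grid, c)
--         if i == -1 and j == -1:
--             continue
--         table[i][j] = 1
--         fill_value(grid, table, i, j, c)
--         for i in range(len(grid)):
--             for j in range(len(grid[i])):
--                 if grid[i][j] == c and table[i][j] == 0:
--                     return False
--     return True
--
-- def find_c(grid, c):
--     for i in range(len(grid)):
--         for j in range(len(grid[i])):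
--             if grid[i][j] == c:
--                 return i, j
--     return -1, -1
--
-- def fill_value(grid, table, i, j, c):
--     if i > 0 and grid[i - 1][j] == c and table[i - 1][j] == 0:
--         table[i - 1][j] = 1
--         fill_value(grid, table, i - 1, j, c)
--     if i < len(grid) - 1 and grid[i + 1][j] == c and table[i + 1][j] == 0:
--         table[i + 1][j] = 1
--         fill_value(grid, table, i + 1, j, c)
--     if j > 0 and grid[i][j - 1] == c and table[i][j - 1] == 0:
--         table[i][j - 1] = 1
--         fill_value(grid, table, i, j - 1, c)
--     if j < len(grid[i]) - 1 and grid[i][j + 1] == c and table[i][j + 1] == 0: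
--         table[i][j + 1] = 1
--         fill_value(grid, table, i, j + 1, c)
-- ===== SOURCE B (Python) =====
-- def check(grid):
--     for c in ["a", "b", "c"]:
--         cells = [(i, j) for i in range(len(grid)) for j in range(len(grid[i]))
--                  if grid[i][j] == c]
--         if not cells:
--             continue
--         seed = cells[0]
--         marked = {seed}
--         frontier = [seed]
--         while frontier:
--             new = []
--             for (i, j) in frontier:
--                 nbrs = []
--                 if i > 0:
--                     nbrs.append((i - 1, j))
--                 if i + 1 < len(grid):
--                     nbrs.append((i + 1, j))
--                 if j > 0:
--                     nbrs.append((i, j - 1))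
--                 nbrs.append((i, j + 1))
--                 for (x, y) in nbrs:
--                     if y < len(grid[x]) and grid[x][y] == c and (x, y) not in marked:
--                         marked.add((x, y))
--                         new.append((x, y))
--             frontier = new
--         if any(p not in marked for p in cells):
--             return False
--     return True
-- ===== Notes on version B (the rewrite author's own statement) =====
-- stated objective: alternative
-- what changed: A runs a recursive 4-way flood fill per character over a mutable 0/1 table seeded by find_c and then rescans the grid for unfilled cells; B instead collects each character's cells in one comprehension and grows the component by frontier-based BFS over a set of coordinates, then checks set membership of every cell.
-- outside the precondition, e.g. on check([['b'], ['x', 'y']]): A returns True, B returns True; on check([['b', 'x'], ['b']]): A returns True, B returns True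
import Mathlib
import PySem

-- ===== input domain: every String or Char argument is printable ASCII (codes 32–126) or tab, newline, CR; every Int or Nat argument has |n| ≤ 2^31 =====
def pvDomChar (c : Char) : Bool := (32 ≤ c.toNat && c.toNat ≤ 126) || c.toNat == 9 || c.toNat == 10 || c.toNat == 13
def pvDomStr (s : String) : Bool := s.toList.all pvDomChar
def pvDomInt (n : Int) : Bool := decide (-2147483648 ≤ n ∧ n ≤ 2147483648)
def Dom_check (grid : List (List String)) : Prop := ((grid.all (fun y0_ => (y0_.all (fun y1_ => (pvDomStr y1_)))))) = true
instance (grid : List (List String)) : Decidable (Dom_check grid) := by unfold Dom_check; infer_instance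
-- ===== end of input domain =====

-- B replaces A's per-character recursive flood fill over a 0/1 table by a frontier BFS over a
-- set of coordinates (alternative decomposition; equivalence proved on the return value only).

-- ===== PORT A =====
-- shared cell accessors (grid[i][j] / len(grid[i]) as total functions; exact inside Pre_check)
def pvCell (grid : List (List String)) (i j : Nat) : String := (grid.getD i []).getD j ""
def pvRowLen (grid : List (List String)) (i : Nat) : Nat := (grid.getD i []).length
-- table[i][j] read / in-place write (A's mutable 0/1 table)
def pvTget (t : List (List Int)) (i j : Nat) : Int := (t.getD i []).getD j 0
def pvTset (t : List (List Int)) (i j : Nat) : List (List Int) :=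
  t.modify i (fun row => row.set j 1)

-- find_c: row-major scan for the first cell equal to c
def findCRow (row : List String) (c : String) (j : Nat) : Option Nat :=
  match row with
  | [] => none
  | x :: xs => if x == c then some j else findCRow xs c (j + 1)

def findCAux (rows : List (List String)) (c : String) (i : Nat) : Int × Int :=
  match rows with
  | [] => (-1, -1)
  | row :: rest =>
    match findCRow row c 0 with
    | some j => ((i : Int), (j : Int))
    | none => findCAux rest c (i + 1)

def findC (grid : List (List String)) (c : String) : Int × Int := findCAux grid c 0

-- fill_value: recursive flood fill; fuel bounds the recursion depth (Python's recursion
-- terminates because every call first marks a fresh cell; the fuel passed in check suffices)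
def fillValue (grid : List (List String)) (c : String) :
    Nat → List (List Int) → Nat → Nat → List (List Int)
  | 0, t, _, _ => t
  | fuel + 1, t, i, j =>
    let t1 := if 0 < i ∧ pvCell grid (i-1) j = c ∧ pvTget t (i-1) j = 0 then
                fillValue grid c fuel (pvTset t (i-1) j) (i-1) j else t
    let t2 := if i < grid.length - 1 ∧ pvCell grid (i+1) j = c ∧ pvTget t1 (i+1) j = 0 then
                fillValue grid c fuel (pvTset t1 (i+1) j) (i+1) j else t1
    let t3 := if 0 < j ∧ pvCell grid i (j-1) = c ∧ pvTget t2 i (j-1) = 0 then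
                fillValue grid c fuel (pvTset t2 i (j-1)) i (j-1) else t2
    if j < pvRowLen grid i - 1 ∧ pvCell grid i (j+1) = c ∧ pvTget t3 i (j+1) = 0 then
      fillValue grid c fuel (pvTset t3 i (j+1)) i (j+1) else t3

def mkTable (h w : Nat) : List (List Int) :=
  (List.range h).map (fun _ => (List.range w).map (fun _ => (0 : Int)))

-- A's final scan: 'return False' as soon as an unfilled c-cell exists
def badScan (grid : List (List String)) (c : String) (t : List (List Int)) : Bool :=
  (List.range grid.length).any fun i =>
    (List.range (pvRowLen grid i)).any fun j =>
      pvCell grid i j == c && pvTget t i j == 0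

def checkAux (grid : List (List String)) : List String → Bool
  | [] => true
  | c :: cs =>
    let table := mkTable grid.length (pvRowLen grid 0)
    let ij := findC grid c
    if ij.1 == -1 && ij.2 == -1 then checkAux grid cs
    else
      let i := ij.1.toNat
      let j := ij.2.toNat
      let table2 :=
        fillValue grid c (grid.length * pvRowLen grid 0 + 1) (pvTset table i j) i j
      if badScan grid c table2 then false else checkAux grid cs

def check (grid : List (List String)) : Bool := checkAux grid ["a", "b", "c"]

-- ===== PORT B =====
-- all c-cells in row-major order
def cellsOf (grid : List (List String)) (c : String) : List (Nat × Nat) :=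
  (List.range grid.length).flatMap fun i =>
    (List.range (pvRowLen grid i)).filterMap fun j =>
      if pvCell grid i j == c then some (i, j) else none

-- candidate neighbours of (i, j) (up, down, left, right; guarded as in Source B)
def nbrsOf (grid : List (List String)) (i j : Nat) : List (Nat × Nat) :=
  ((if 0 < i then [(i - 1, j)] else []) ++
   (if i + 1 < grid.length then [(i + 1, j)] else []) ++
   (if 0 < j then [(i, j - 1)] else [])) ++ [(i, j + 1)]

-- body of 'for (i, j) in frontier': add fresh same-character neighbours to marked and new
def visitCell (grid : List (List String)) (c : String)
    (st : PySem.Set (Nat × Nat) × List (Nat × Nat)) (p : Nat × Nat) :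
    PySem.Set (Nat × Nat) × List (Nat × Nat) :=
  (nbrsOf grid p.1 p.2).foldl (fun st q =>
    if q.2 < pvRowLen grid q.1 && pvCell grid q.1 q.2 == c && !(PySem.Set.contains st.1 q) then
      (PySem.Set.add st.1 q, st.2 ++ [q])
    else st) st

-- 'while frontier:'; fuel bounds the number of rounds (each non-final round marks a new cell)
def bfs (grid : List (List String)) (c : String) :
    Nat → PySem.Set (Nat × Nat) → List (Nat × Nat) → PySem.Set (Nat × Nat)
  | 0, m, _ => m
  | fuel + 1, m, fr =>
    if fr.isEmpty then m
    else
      let st := fr.foldl (visitCell grid c) (m, [])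
      bfs grid c fuel st.1 st.2

def check_alt (grid : List (List String)) : Bool :=
  ["a", "b", "c"].all fun c =>
    match cellsOf grid c with
    | [] => true
    | s :: rest =>
      let m := bfs grid c ((s :: rest).length + 2) (PySem.Set.ofList [s]) [s]
      (s :: rest).all fun p => PySem.Set.contains m p

-- ===== PRECONDITION & SPEC =====
-- Pre_check excludes ragged grids that contain an 'a'/'b'/'c' cell: there A's fixed-width
-- table (sized by len(grid[0])) and its unguarded neighbour reads can raise IndexError.
-- Grids with no 'a'/'b'/'c' at all are kept whatever their shape (A only scans them), and
-- rectangular grids (the natural domain of the task) are all kept.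
def Pre_check (grid : List (List String)) : Prop :=
  (∀ row ∈ grid, row.length = (grid.headD []).length) ∨
  (∀ row ∈ grid, ∀ x ∈ row, ¬(x = "a" ∨ x = "b" ∨ x = "c"))
instance (grid : List (List String)) : Decidable (Pre_check grid) := by
  unfold Pre_check; infer_instance

def pvWitness_check : List (List String) := [["a", "b"], ["a", "c"]]

def Spec_check (grid : List (List String)) (out : Bool) : Prop := out = check_alt grid
instance (grid : List (List String)) (out : Bool) : Decidable (Spec_check grid out) := by
  unfold Spec_check; infer_instance

-- ===== CLAIM (what is proved, stated in full; the proofs are below) =====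
def Claim_equal_check : Prop :=
  ∀ (grid : List (List String)), Dom_check grid → Pre_check grid → Spec_check grid (check grid)

-- ===== LEMMAS AND PROOFS =====

-- ---------- shared graph view: c-cells and 4-adjacency ----------
def Pc (grid : List (List String)) (c : String) (p : Nat × Nat) : Prop :=
  pvCell grid p.1 p.2 = c

def Step (grid : List (List String)) (c : String) (p q : Nat × Nat) : Prop :=
  Pc grid c q ∧
    ((0 < p.1 ∧ q = (p.1 - 1, p.2)) ∨ q = (p.1 + 1, p.2) ∨
     (0 < p.2 ∧ q = (p.1, p.2 - 1)) ∨ q = (p.1, p.2 + 1))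

def Reach (grid : List (List String)) (c : String) (s q : Nat × Nat) : Prop :=
  Relation.ReflTransGen (Step grid c) s q

-- a c-cell is in range (c ≠ "" so the out-of-range default "" cannot match)
lemma pc_lt {grid : List (List String)} {c : String} {p : Nat × Nat}
    (hc : c ≠ "") (h : Pc grid c p) : p.1 < grid.length ∧ p.2 < pvRowLen grid p.1 := by
  unfold Pc pvCell at h
  unfold pvRowLen
  have hj : p.2 < (grid.getD p.1 []).length := by
    by_contra hj
    rw [List.getD_eq_getElem?_getD (l := grid.getD p.1 []),
      List.getElem?_eq_none (by omega), Option.getD_none] at h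
    exact hc h.symm
  refine ⟨?_, hj⟩
  by_contra hi
  rw [List.getD_eq_getElem?_getD (l := grid), List.getElem?_eq_none (by omega),
    Option.getD_none] at hj
  simp at hj

-- anything closed under Step that contains s contains everything reachable from s
lemma reach_closed {grid : List (List String)} {c : String} {s : Nat × Nat}
    (S : Nat × Nat → Prop) (hs : S s)
    (hcl : ∀ p, S p → ∀ q, Step grid c p q → S q) :
    ∀ p, Reach grid c s p → S p := by
  intro p hp
  induction hp with
  | refl => exact hs
  | tail _ hstep ih => exact hcl _ ih _ hstep

-- ---------- table read/write lemmas ----------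
lemma getD_modify (t : List (List Int)) (i : Nat) (f : List Int → List Int) (x : Nat) :
    (t.modify i f).getD x [] = if i = x ∧ x < t.length then f (t.getD x []) else t.getD x [] := by
  rw [List.getD_eq_getElem?_getD, List.getElem?_modify, List.getD_eq_getElem?_getD]
  by_cases hx : x < t.length
  · rw [List.getElem?_eq_getElem hx]
    by_cases hix : i = x <;> simp [hix, hx]
  · rw [List.getElem?_eq_none (by omega)]
    simp; intro h; omega

lemma getD_set (row : List Int) (j y : Nat) :
    (row.set j 1).getD y 0 = if j = y ∧ j < row.length then 1 else row.getD y 0 := by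
  rw [List.getD_eq_getElem?_getD, List.getElem?_set, List.getD_eq_getElem?_getD]
  by_cases hjy : j = y
  · subst hjy
    by_cases hl : j < row.length <;> simp [hl]
  · simp [hjy]

lemma pvTget_pvTset (t : List (List Int)) (i j x y : Nat) :
    pvTget (pvTset t i j) x y =
      if i = x ∧ j = y ∧ x < t.length ∧ y < (t.getD x []).length then 1
      else pvTget t x y := by
  unfold pvTget pvTset
  rw [getD_modify]
  by_cases hix : i = x ∧ x < t.length
  · obtain ⟨hix', hx⟩ := hix
    subst hix'
    rw [if_pos ⟨rfl, hx⟩, getD_set]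
    by_cases hjy : j = y ∧ j < (t.getD i []).length
    · rw [if_pos hjy, if_pos ⟨rfl, hjy.1, hx, hjy.1 ▸ hjy.2⟩]
    · rw [if_neg hjy, if_neg ?_]
      rintro ⟨-, h1, -, h2⟩
      subst h1
      exact hjy ⟨rfl, h2⟩
  · rw [if_neg hix, if_neg (by tauto)]

-- ---------- A-side: marked cells, table shape, unmarked-cell count ----------
def markedT (t : List (List Int)) (p : Nat × Nat) : Prop := pvTget t p.1 p.2 ≠ 0

def ShapeT (grid : List (List String)) (t : List (List Int)) : Prop :=
  t.length = grid.length ∧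
  ∀ x, x < grid.length → (t.getD x []).length = pvRowLen grid 0

-- rectangularity transfers the row-0 width to every row
def Rect (grid : List (List String)) : Prop :=
  ∀ row ∈ grid, row.length = (grid.headD []).length

lemma rect_rowLen {grid : List (List String)} (hr : Rect grid) {i : Nat}
    (hi : i < grid.length) : pvRowLen grid i = pvRowLen grid 0 := by
  have h0 : grid.headD [] = grid.getD 0 [] := by
    cases grid with
    | nil => rfl
    | cons r rs => rfl
  have hmem : grid.getD i [] ∈ grid := by
    rw [List.getD_eq_getElem?_getD, List.getElem?_eq_getElem hi]
    exact List.getElem_mem hi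
  have := hr _ hmem
  unfold pvRowLen
  rw [this, h0]

lemma markedT_pvTset_of (t : List (List Int)) (i j : Nat) {p : Nat × Nat}
    (h : markedT t p) : markedT (pvTset t i j) p := by
  unfold markedT at *
  rw [pvTget_pvTset]
  split
  · simp
  · exact h

lemma markedT_pvTset_elim {t : List (List Int)} {i j : Nat} {p : Nat × Nat}
    (h : markedT (pvTset t i j) p) : markedT t p ∨ p = (i, j) := by
  unfold markedT at h
  rw [pvTget_pvTset] at h
  by_cases hp : p = (i, j)
  · exact Or.inr hp
  · left
    rwa [if_neg (by rintro ⟨h1, h2, -⟩; exact hp (by cases p; simp_all))] at h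

lemma markedT_pvTset_self {grid : List (List String)} {t : List (List Int)} {i j : Nat}
    (hs : ShapeT grid t) (hi : i < grid.length) (hj : j < pvRowLen grid 0) :
    markedT (pvTset t i j) (i, j) := by
  unfold markedT
  rw [pvTget_pvTset, if_pos ⟨rfl, rfl, by rw [hs.1]; exact hi, by rw [hs.2 i hi]; exact hj⟩]
  simp

lemma shapeT_pvTset {grid : List (List String)} {t : List (List Int)} (i j : Nat)
    (hs : ShapeT grid t) : ShapeT grid (pvTset t i j) := by
  refine ⟨by unfold pvTset; rw [List.length_modify]; exact hs.1, ?_⟩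
  intro x hx
  unfold pvTset
  rw [getD_modify]
  split
  · rw [List.length_set]; exact hs.2 x hx
  · exact hs.2 x hx

lemma shapeT_mkTable (grid : List (List String)) :
    ShapeT grid (mkTable grid.length (pvRowLen grid 0)) := by
  unfold mkTable ShapeT
  constructor
  · simp
  · intro x hx
    rw [List.getD_eq_getElem?_getD, List.getElem?_map,
      List.getElem?_range (by simpa using hx)]
    simp

lemma markedT_mkTable (grid : List (List String)) (p : Nat × Nat) :
    ¬ markedT (mkTable grid.length (pvRowLen grid 0)) p := by
  unfold markedT pvTget mkTable
  intro h
  apply h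
  rw [List.getD_eq_getElem?_getD (l := (List.range grid.length).map _), List.getElem?_map]
  by_cases hx : p.1 < grid.length
  · rw [List.getElem?_range (by simpa using hx)]
    simp only [Option.map_some, Option.getD_some]
    rw [List.getD_eq_getElem?_getD, List.getElem?_map]
    by_cases hy : p.2 < pvRowLen grid 0
    · rw [List.getElem?_range (by simpa using hy)]; simp
    · rw [List.getElem?_eq_none (by simpa using hy)]; simp
  · rw [List.getElem?_eq_none (by simpa using hx)]; simp

-- the count of still-unmarked positions of the H×W index rectangle
def allIdx (grid : List (List String)) : List (Nat × Nat) :=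
  (List.range grid.length).flatMap fun i =>
    (List.range (pvRowLen grid 0)).map (fun j => (i, j))

def unmarked (grid : List (List String)) (t : List (List Int)) : Nat :=
  (allIdx grid).countP (fun p => pvTget t p.1 p.2 == 0)

lemma mem_allIdx (grid : List (List String)) (p : Nat × Nat) :
    p ∈ allIdx grid ↔ p.1 < grid.length ∧ p.2 < pvRowLen grid 0 := by
  unfold allIdx
  simp only [List.mem_flatMap, List.mem_map, List.mem_range]
  constructor
  · rintro ⟨i, hi, j, hj, rfl⟩; exact ⟨hi, hj⟩
  · rintro ⟨h1, h2⟩; exact ⟨p.1, h1, p.2, h2, rfl⟩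

lemma length_allIdx (grid : List (List String)) :
    (allIdx grid).length = grid.length * pvRowLen grid 0 := by
  unfold allIdx
  rw [List.length_flatMap]
  simp

lemma unmarked_le (grid : List (List String)) (t : List (List Int)) :
    unmarked grid t ≤ grid.length * pvRowLen grid 0 := by
  calc unmarked grid t ≤ (allIdx grid).length := List.countP_le_length
    _ = _ := length_allIdx grid

lemma unmarked_mono {grid : List (List String)} {t t' : List (List Int)}
    (h : ∀ p, markedT t p → markedT t' p) : unmarked grid t' ≤ unmarked grid t := by
  apply List.countP_mono_left
  intro p _ hp
  simp only [beq_iff_eq] at hp ⊢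
  by_contra hne
  exact h p hne hp

lemma unmarked_pvTset_lt {grid : List (List String)} {t : List (List Int)} {i j : Nat}
    (hs : ShapeT grid t) (hi : i < grid.length) (hj : j < pvRowLen grid 0)
    (h0 : pvTget t i j = 0) :
    unmarked grid (pvTset t i j) < unmarked grid t := by
  have hmem : (i, j) ∈ allIdx grid := (mem_allIdx grid (i, j)).mpr ⟨hi, hj⟩
  obtain ⟨l1, l2, hsplit⟩ := List.append_of_mem hmem
  unfold unmarked
  rw [hsplit, List.countP_append, List.countP_append, List.countP_cons, List.countP_cons]
  have hself : (pvTget (pvTset t i j) i j == 0) = false := by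
    have := markedT_pvTset_self (t := t) hs hi hj
    unfold markedT at this
    simpa using this
  have hold : (pvTget t i j == 0) = true := by simpa using h0
  simp only [hself, hold]
  have h1 : l1.countP (fun p => pvTget (pvTset t i j) p.1 p.2 == 0) ≤
      l1.countP (fun p => pvTget t p.1 p.2 == 0) := by
    apply List.countP_mono_left
    intro p _ hp
    simp only [beq_iff_eq] at hp ⊢
    by_contra hne
    exact markedT_pvTset_of t i j (p := p) hne hp
  have h2 : l2.countP (fun p => pvTget (pvTset t i j) p.1 p.2 == 0) ≤
      l2.countP (fun p => pvTget t p.1 p.2 == 0) := by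
    apply List.countP_mono_left
    intro p _ hp
    simp only [beq_iff_eq] at hp ⊢
    by_contra hne
    exact markedT_pvTset_of t i j (p := p) hne hp
  simp only [Bool.false_eq_true, if_false, if_true]
  omega

-- post-condition of one fill_value call rooted at p: monotone marking, shape kept,
-- p's neighbourhood saturated, and every new mark reachable from p and itself saturated
def FillPost (grid : List (List String)) (c : String)
    (t res : List (List Int)) (p : Nat × Nat) : Prop :=
  (∀ q, markedT t q → markedT res q) ∧ ShapeT grid res ∧
  (∀ q, Step grid c p q → markedT res q) ∧
  (∀ q, markedT res q →
    markedT t q ∨ (Reach grid c p q ∧ ∀ r, Step grid c q r → markedT res r))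

-- one guarded branch of fill_value
lemma fill_branch (grid : List (List String)) (c : String)
    (hrect : Rect grid) (hc : c ≠ "") (n : Nat)
    (IH : ∀ t i j, ShapeT grid t → unmarked grid t < n →
      FillPost grid c t (fillValue grid c n t i j) (i, j))
    (origin : Nat × Nat) (t : List (List Int))
    (ht : ShapeT grid t) (hf : unmarked grid t ≤ n)
    (ni nj : Nat) (cond : Prop) [inst : Decidable cond]
    (hg1 : cond → Step grid c origin (ni, nj) ∧ pvTget t ni nj = 0)
    (hg2 : Step grid c origin (ni, nj) → pvTget t ni nj = 0 → cond) :
    (∀ q, markedT t q →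
      markedT (if cond then fillValue grid c n (pvTset t ni nj) ni nj else t) q) ∧
    ShapeT grid (if cond then fillValue grid c n (pvTset t ni nj) ni nj else t) ∧
    unmarked grid (if cond then fillValue grid c n (pvTset t ni nj) ni nj else t) ≤
      unmarked grid t ∧
    (Step grid c origin (ni, nj) →
      markedT (if cond then fillValue grid c n (pvTset t ni nj) ni nj else t) (ni, nj)) ∧
    (∀ q, markedT (if cond then fillValue grid c n (pvTset t ni nj) ni nj else t) q →
      markedT t q ∨ (Reach grid c origin q ∧ ∀ r, Step grid c q r →
        markedT (if cond then fillValue grid c n (pvTset t ni nj) ni nj else t) r)) := by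
  by_cases hcnd : cond
  · simp only [if_pos hcnd]
    obtain ⟨hstep, h0⟩ := hg1 hcnd
    have hpc : Pc grid c (ni, nj) := hstep.1
    have hlt := pc_lt hc hpc
    have hlt2 : ni < grid.length ∧ nj < pvRowLen grid ni := hlt
    have hj0 : nj < pvRowLen grid 0 := by
      have := rect_rowLen hrect hlt2.1
      omega
    have hi0 : ni < grid.length := hlt2.1
    have hts : ShapeT grid (pvTset t ni nj) := shapeT_pvTset _ _ ht
    have hun : unmarked grid (pvTset t ni nj) < n :=
      lt_of_lt_of_le (unmarked_pvTset_lt ht hi0 hj0 h0) hf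
    obtain ⟨Hmono, Hshape, Hclo, Hnew⟩ := IH (pvTset t ni nj) ni nj hts hun
    have hmono' : ∀ q, markedT t q →
        markedT (fillValue grid c n (pvTset t ni nj) ni nj) q :=
      fun q hq => Hmono q (markedT_pvTset_of _ _ _ hq)
    refine ⟨hmono', Hshape, unmarked_mono hmono', ?_, ?_⟩
    · intro _
      exact Hmono _ (markedT_pvTset_self ht hi0 hj0)
    · intro q hq
      rcases Hnew q hq with h | ⟨hr, hcl⟩
      · rcases markedT_pvTset_elim h with h' | rfl
        · exact Or.inl h'
        · exact Or.inr ⟨Relation.ReflTransGen.single hstep, Hclo⟩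
      · exact Or.inr ⟨Relation.ReflTransGen.head hstep hr, hcl⟩
  · simp only [if_neg hcnd]
    refine ⟨fun q hq => hq, ht, le_refl _, ?_, fun q hq => Or.inl hq⟩
    intro hstep
    unfold markedT
    intro h0
    exact hcnd (hg2 hstep h0)

-- flood fill with enough fuel satisfies FillPost
lemma fill_main (grid : List (List String)) (c : String)
    (hrect : Rect grid) (hc : c ≠ "") :
    ∀ fuel t i j, ShapeT grid t → unmarked grid t < fuel →
      FillPost grid c t (fillValue grid c fuel t i j) (i, j) := by
  intro fuel
  induction fuel with
  | zero => intro t i j _ h; omega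
  | succ n IH =>
    intro t i j ht hf
    have hf' : unmarked grid t ≤ n := by omega
    have B1 := fill_branch grid c hrect hc n IH (i, j) t ht hf' (i-1) j
      (0 < i ∧ pvCell grid (i-1) j = c ∧ pvTget t (i-1) j = 0)
      (fun h => ⟨⟨h.2.1, Or.inl ⟨h.1, rfl⟩⟩, h.2.2⟩)
      (by
        rintro ⟨hpc, hcase⟩ h0
        refine ⟨?_, hpc, h0⟩
        rcases hcase with ⟨hi0, he⟩ | he | ⟨hj0, he⟩ | he <;>
          rw [Prod.mk.injEq] at he <;> omega)
    set t1 : List (List Int) :=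
      if 0 < i ∧ pvCell grid (i-1) j = c ∧ pvTget t (i-1) j = 0 then
        fillValue grid c n (pvTset t (i-1) j) (i-1) j else t with ht1def
    obtain ⟨m1, s1, u1, k1, n1⟩ := B1
    have B2 := fill_branch grid c hrect hc n IH (i, j) t1 s1 (le_trans u1 hf') (i+1) j
      (i < grid.length - 1 ∧ pvCell grid (i+1) j = c ∧ pvTget t1 (i+1) j = 0)
      (fun h => ⟨⟨h.2.1, Or.inr (Or.inl rfl)⟩, h.2.2⟩)
      (by
        rintro ⟨hpc, -⟩ h0
        have hb : (i+1) < grid.length ∧ j < pvRowLen grid (i+1) := pc_lt hc hpc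
        exact ⟨by omega, hpc, h0⟩)
    set t2 : List (List Int) :=
      if i < grid.length - 1 ∧ pvCell grid (i+1) j = c ∧ pvTget t1 (i+1) j = 0 then
        fillValue grid c n (pvTset t1 (i+1) j) (i+1) j else t1 with ht2def
    obtain ⟨m2, s2, u2, k2, n2⟩ := B2
    have B3 := fill_branch grid c hrect hc n IH (i, j) t2 s2
      (le_trans u2 (le_trans u1 hf')) i (j-1)
      (0 < j ∧ pvCell grid i (j-1) = c ∧ pvTget t2 i (j-1) = 0)
      (fun h => ⟨⟨h.2.1, Or.inr (Or.inr (Or.inl ⟨h.1, rfl⟩))⟩, h.2.2⟩)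
      (by
        rintro ⟨hpc, hcase⟩ h0
        refine ⟨?_, hpc, h0⟩
        rcases hcase with ⟨hi0, he⟩ | he | ⟨hj0, he⟩ | he <;>
          rw [Prod.mk.injEq] at he <;> omega)
    set t3 : List (List Int) :=
      if 0 < j ∧ pvCell grid i (j-1) = c ∧ pvTget t2 i (j-1) = 0 then
        fillValue grid c n (pvTset t2 i (j-1)) i (j-1) else t2 with ht3def
    obtain ⟨m3, s3, u3, k3, n3⟩ := B3
    have B4 := fill_branch grid c hrect hc n IH (i, j) t3 s3
      (le_trans u3 (le_trans u2 (le_trans u1 hf'))) i (j+1)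
      (j < pvRowLen grid i - 1 ∧ pvCell grid i (j+1) = c ∧ pvTget t3 i (j+1) = 0)
      (fun h => ⟨⟨h.2.1, Or.inr (Or.inr (Or.inr rfl))⟩, h.2.2⟩)
      (by
        rintro ⟨hpc, -⟩ h0
        have hb : i < grid.length ∧ (j+1) < pvRowLen grid i := pc_lt hc hpc
        exact ⟨by omega, hpc, h0⟩)
    set t4 : List (List Int) :=
      if j < pvRowLen grid i - 1 ∧ pvCell grid i (j+1) = c ∧ pvTget t3 i (j+1) = 0 then
        fillValue grid c n (pvTset t3 i (j+1)) i (j+1) else t3 with ht4def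
    obtain ⟨m4, s4, u4, k4, n4⟩ := B4
    have heq : fillValue grid c (n+1) t i j = t4 := rfl
    rw [heq]
    refine ⟨fun q hq => m4 q (m3 q (m2 q (m1 q hq))), s4, ?_, ?_⟩
    · rintro q ⟨hpc, hcase⟩
      rcases hcase with ⟨hi0, rfl⟩ | rfl | ⟨hj0, rfl⟩ | rfl
      · exact m4 _ (m3 _ (m2 _ (k1 ⟨hpc, Or.inl ⟨hi0, rfl⟩⟩)))
      · exact m4 _ (m3 _ (k2 ⟨hpc, Or.inr (Or.inl rfl)⟩))
      · exact m4 _ (k3 ⟨hpc, Or.inr (Or.inr (Or.inl ⟨hj0, rfl⟩))⟩)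
      · exact k4 ⟨hpc, Or.inr (Or.inr (Or.inr rfl))⟩
    · intro q hq
      rcases n4 q hq with h3 | ⟨hr, hcl⟩
      · rcases n3 q h3 with h2 | ⟨hr, hcl⟩
        · rcases n2 q h2 with h1 | ⟨hr, hcl⟩
          · rcases n1 q h1 with h0 | ⟨hr, hcl⟩
            · exact Or.inl h0
            · exact Or.inr ⟨hr, fun r hsr => m4 r (m3 r (m2 r (hcl r hsr)))⟩
          · exact Or.inr ⟨hr, fun r hsr => m4 r (m3 r (hcl r hsr))⟩
        · exact Or.inr ⟨hr, fun r hsr => m4 r (hcl r hsr)⟩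
      · exact Or.inr ⟨hr, hcl⟩

-- the table A computes marks exactly the cells reachable from the seed
lemma A_marked_iff (grid : List (List String)) (c : String)
    (hrect : Rect grid) (hc : c ≠ "") (s : Nat × Nat) (hPs : Pc grid c s) :
    ∀ p, markedT (fillValue grid c (grid.length * pvRowLen grid 0 + 1)
        (pvTset (mkTable grid.length (pvRowLen grid 0)) s.1 s.2) s.1 s.2) p ↔
      Reach grid c s p := by
  have hbs := pc_lt hc hPs
  have hj0 : s.2 < pvRowLen grid 0 := by
    have := rect_rowLen hrect hbs.1
    omega
  have ht0 := shapeT_mkTable grid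
  have hts : ShapeT grid (pvTset (mkTable grid.length (pvRowLen grid 0)) s.1 s.2) :=
    shapeT_pvTset _ _ ht0
  have hfuel : unmarked grid (pvTset (mkTable grid.length (pvRowLen grid 0)) s.1 s.2) <
      grid.length * pvRowLen grid 0 + 1 :=
    Nat.lt_succ_of_le (unmarked_le _ _)
  obtain ⟨Hmono, Hshape, Hclo, Hnew⟩ :=
    fill_main grid c hrect hc (grid.length * pvRowLen grid 0 + 1) _ s.1 s.2 hts hfuel
  have hseed : markedT (fillValue grid c (grid.length * pvRowLen grid 0 + 1)
      (pvTset (mkTable grid.length (pvRowLen grid 0)) s.1 s.2) s.1 s.2) s :=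
    Hmono s (markedT_pvTset_self ht0 hbs.1 hj0)
  intro p
  constructor
  · intro hm
    rcases Hnew p hm with h0 | ⟨hr, -⟩
    · rcases markedT_pvTset_elim h0 with h1 | rfl
      · exact absurd h1 (markedT_mkTable grid p)
      · exact Relation.ReflTransGen.refl
    · exact hr
  · refine reach_closed _ hseed ?_ p
    intro q hq r hstep
    rcases Hnew q hq with h0 | ⟨-, hcl⟩
    · rcases markedT_pvTset_elim h0 with h1 | rfl
      · exact absurd h1 (markedT_mkTable grid q)
      · exact Hclo r hstep
    · exact hcl r hstep

lemma badScan_true_iff (grid : List (List String)) (c : String) (t : List (List Int))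
    (hc : c ≠ "") :
    badScan grid c t = true ↔ ∃ p, Pc grid c p ∧ pvTget t p.1 p.2 = 0 := by
  unfold badScan
  simp only [List.any_eq_true, List.mem_range, Bool.and_eq_true, beq_iff_eq]
  constructor
  · rintro ⟨i, hi, j, ⟨hj, hcell, h0⟩⟩
    exact ⟨(i, j), hcell, h0⟩
  · rintro ⟨p, hpc, h0⟩
    have hb := pc_lt hc hpc
    exact ⟨p.1, hb.1, p.2, hb.2, hpc, h0⟩

-- ---------- cellsOf and find_c agree on the seed ----------
lemma mem_cellsOf (grid : List (List String)) (c : String) (hc : c ≠ "") (p : Nat × Nat) :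
    p ∈ cellsOf grid c ↔ Pc grid c p := by
  unfold cellsOf
  simp only [List.mem_flatMap, List.mem_filterMap, List.mem_range]
  constructor
  · rintro ⟨i, hi, j, hj, hopt⟩
    by_cases h : pvCell grid i j == c
    · rw [if_pos h] at hopt
      obtain rfl := Option.some.inj hopt
      exact (beq_iff_eq).mp h
    · rw [if_neg h] at hopt
      cases hopt
  · intro hpc
    have hb := pc_lt hc hpc
    exact ⟨p.1, hb.1, p.2, hb.2, by rw [if_pos (by exact beq_iff_eq.mpr hpc)]⟩

def rowCells (row : List String) (c : String) : List Nat :=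
  (List.range row.length).filterMap fun j => if row.getD j "" == c then some j else none

lemma rowCells_cons (x : String) (xs : List String) (c : String) :
    rowCells (x :: xs) c =
      (if x == c then [0] else []) ++ (rowCells xs c).map (· + 1) := by
  unfold rowCells
  rw [List.length_cons, List.range_succ_eq_map, List.filterMap_cons, List.filterMap_map,
    List.map_filterMap]
  have h2 : ∀ j, ((fun j => if (x :: xs).getD j "" == c then some j else none) ∘ Nat.succ) j =
      (fun j => Option.map (· + 1) (if xs.getD j "" == c then some j else none)) j := by
    intro j
    simp only [Function.comp_apply]
    have : (x :: xs).getD (j + 1) "" = xs.getD j "" := rfl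
    rw [this]
    by_cases h : xs.getD j "" == c
    · rw [if_pos h, if_pos h]
      try simp
    · rw [if_neg h, if_neg h]
      try simp
  rw [funext h2]
  have h1 : ((x :: xs).getD 0 "" == c) = (x == c) := rfl
  rw [h1]
  cases h : (x == c)
  · simp only [h, Bool.false_eq_true, if_false, List.nil_append]
  · simp only [h, if_true, List.singleton_append]

lemma cellsOf_cons (row : List String) (rest : List (List String)) (c : String) :
    cellsOf (row :: rest) c =
      ((rowCells row c).map fun j => (0, j)) ++
      ((cellsOf rest c).map fun p => (p.1 + 1, p.2)) := by
  unfold cellsOf rowCells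
  rw [List.length_cons, List.range_succ_eq_map, List.flatMap_cons, List.flatMap_map,
    List.map_filterMap, List.map_flatMap]
  congr 1
  · have h0 : pvRowLen (row :: rest) 0 = row.length := rfl
    rw [h0]
    congr 1
    funext j
    have : pvCell (row :: rest) 0 j = row.getD j "" := rfl
    rw [this]
    by_cases h : row.getD j "" == c
    · rw [if_pos h, if_pos h]
      try simp
    · rw [if_neg h, if_neg h]
      try simp
  · congr 1
    funext i
    try simp only [Function.comp_apply]
    have h1 : pvRowLen (row :: rest) (i + 1) = pvRowLen rest i := rfl
    rw [h1, List.map_filterMap]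
    congr 1
    funext j
    have : pvCell (row :: rest) (i + 1) j = pvCell rest i j := rfl
    rw [this]
    by_cases h : pvCell rest i j == c
    · rw [if_pos h, if_pos h]
      try simp
    · rw [if_neg h, if_neg h]
      try simp

def seedResult (i : Nat) (o : Option (Nat × Nat)) : Int × Int :=
  match o with
  | none => (-1, -1)
  | some p => (((i + p.1 : Nat) : Int), ((p.2 : Nat) : Int))

lemma findCRow_eq (c : String) : ∀ (row : List String) (k : Nat),
    findCRow row c k = (rowCells row c).head?.map (· + k) := by
  intro row
  induction row with
  | nil => intro k; rfl
  | cons x xs ih =>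
    intro k
    rw [rowCells_cons]
    by_cases h : x == c
    · simp only [findCRow, h, if_true, List.singleton_append, List.head?_cons,
        Option.map_some, Nat.zero_add]
    · simp only [findCRow, h, Bool.false_eq_true, if_false, List.nil_append]
      rw [ih (k + 1), List.head?_map]
      cases hh : (rowCells xs c).head? with
      | none => rfl
      | some a =>
        simp only [Option.map_some]
        congr 1
        omega

lemma findCAux_eq (c : String) : ∀ (rows : List (List String)) (i : Nat),
    findCAux rows c i = seedResult i (cellsOf rows c).head? := by
  intro rows
  induction rows with
  | nil => intro i; rfl
  | cons row rest ih =>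
    intro i
    rw [cellsOf_cons]
    unfold findCAux
    rw [findCRow_eq]
    cases hh : (rowCells row c).head? with
    | some j =>
      obtain ⟨l, hl⟩ := List.head?_eq_some_iff.mp hh
      rw [hl]
      simp only [Option.map_some, List.map_cons, List.cons_append, List.head?_cons,
        seedResult]
      norm_num
    | none =>
      rw [List.head?_eq_none_iff.mp hh]
      simp only [Option.map_none, List.map_nil, List.nil_append]
      rw [ih (i + 1)]
      cases hc2 : (cellsOf rest c).head? with
      | none =>
        rw [List.head?_eq_none_iff.mp hc2]
        rfl
      | some p =>
        obtain ⟨l, hl⟩ := List.head?_eq_some_iff.mp hc2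
        rw [hl]
        simp only [List.map_cons, List.head?_cons, seedResult]
        rw [Prod.mk.injEq]
        constructor
        · push_cast; omega
        · rfl

lemma findC_eq (grid : List (List String)) (c : String) :
    findC grid c = seedResult 0 (cellsOf grid c).head? := by
  unfold findC
  rw [findCAux_eq]

-- ---------- B-side: BFS invariants ----------
lemma nodup_subset_length {α : Type} [DecidableEq α] {l m : List α}
    (h : l.Nodup) (hs : ∀ x ∈ l, x ∈ m) : l.length ≤ m.length := by
  calc l.length = l.toFinset.card := (List.toFinset_card_of_nodup h).symm
    _ ≤ m.toFinset.card := Finset.card_le_card (by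
        intro x hx
        simp only [List.mem_toFinset] at *
        exact hs x hx)
    _ ≤ m.length := m.toFinset_card_le

lemma step_iff_nbrs (grid : List (List String)) (c : String) (hc : c ≠ "")
    (p q : Nat × Nat) :
    Step grid c p q ↔ (q ∈ nbrsOf grid p.1 p.2 ∧ Pc grid c q) := by
  unfold nbrsOf
  constructor
  · rintro ⟨hpc, hcase⟩
    refine ⟨?_, hpc⟩
    simp only [List.mem_append, List.mem_singleton]
    rcases hcase with ⟨hi0, rfl⟩ | rfl | ⟨hj0, rfl⟩ | rfl
    · exact Or.inl (Or.inl (Or.inl (by rw [if_pos hi0]; exact List.mem_singleton.mpr rfl)))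
    · have hb := pc_lt hc hpc
      exact Or.inl (Or.inl (Or.inr (by
        rw [if_pos (show p.1 + 1 < grid.length from hb.1)]
        exact List.mem_singleton.mpr rfl)))
    · exact Or.inl (Or.inr (by rw [if_pos hj0]; exact List.mem_singleton.mpr rfl))
    · exact Or.inr rfl
  · rintro ⟨hmem, hpc⟩
    refine ⟨hpc, ?_⟩
    simp only [List.mem_append, List.mem_singleton] at hmem
    rcases hmem with ((h1 | h2) | h3) | h4
    · by_cases hi : 0 < p.1
      · rw [if_pos hi] at h1
        exact Or.inl ⟨hi, List.mem_singleton.mp h1⟩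
      · rw [if_neg hi] at h1
        cases h1
    · by_cases hi : p.1 + 1 < grid.length
      · rw [if_pos hi] at h2
        exact Or.inr (Or.inl (List.mem_singleton.mp h2))
      · rw [if_neg hi] at h2
        cases h2
    · by_cases hj : 0 < p.2
      · rw [if_pos hj] at h3
        exact Or.inr (Or.inr (Or.inl ⟨hj, List.mem_singleton.mp h3⟩))
      · rw [if_neg hj] at h3
        cases h3
    · exact Or.inr (Or.inr (Or.inr h4))

-- proof-side name for the inner step of visitCell
def innerStep (grid : List (List String)) (c : String)
    (st : PySem.Set (Nat × Nat) × List (Nat × Nat)) (q : Nat × Nat) :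
    PySem.Set (Nat × Nat) × List (Nat × Nat) :=
  if q.2 < pvRowLen grid q.1 && pvCell grid q.1 q.2 == c &&
      !(PySem.Set.contains st.1 q) then
    (PySem.Set.add st.1 q, st.2 ++ [q])
  else st

lemma visitCell_eq (grid : List (List String)) (c : String)
    (st : PySem.Set (Nat × Nat) × List (Nat × Nat)) (p : Nat × Nat) :
    visitCell grid c st p = (nbrsOf grid p.1 p.2).foldl (innerStep grid c) st := rfl

lemma innerStep_cond (grid : List (List String)) (c : String) (hc : c ≠ "")
    (st : PySem.Set (Nat × Nat) × List (Nat × Nat)) (q : Nat × Nat) :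
    (q.2 < pvRowLen grid q.1 && pvCell grid q.1 q.2 == c &&
      !(PySem.Set.contains st.1 q)) = true ↔ (Pc grid c q ∧ q ∉ st.1) := by
  simp only [Bool.and_eq_true, beq_iff_eq, decide_eq_true_eq, Bool.not_eq_true']
  constructor
  · rintro ⟨⟨-, hcell⟩, hcon⟩
    refine ⟨hcell, fun hmem => ?_⟩
    rw [(PySem.Set.contains_iff (s := st.1) (x := q)).mpr hmem] at hcon
    cases hcon
  · rintro ⟨hpc, hnmem⟩
    have hb := pc_lt hc hpc
    refine ⟨⟨hb.2, hpc⟩, ?_⟩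
    cases hcon : PySem.Set.contains st.1 q
    · rfl
    · exact absurd ((PySem.Set.contains_iff (s := st.1) (x := q)).mp hcon) hnmem

-- the inner loop over the neighbour candidates of one frontier cell
lemma inner_fold (grid : List (List String)) (c : String) (hc : c ≠ "") :
    ∀ (ns : List (Nat × Nat)) (st : PySem.Set (Nat × Nat) × List (Nat × Nat)),
    ∃ added : List (Nat × Nat),
      (ns.foldl (innerStep grid c) st).1 = st.1 ++ added ∧
      (ns.foldl (innerStep grid c) st).2 = st.2 ++ added ∧
      (∀ q ∈ added, q ∈ ns ∧ Pc grid c q ∧ q ∉ st.1) ∧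
      (∀ q ∈ ns, Pc grid c q → q ∈ (ns.foldl (innerStep grid c) st).1) ∧
      (st.1.Nodup → (ns.foldl (innerStep grid c) st).1.Nodup) := by
  intro ns
  induction ns with
  | nil =>
    intro st
    exact ⟨[], by simp, by simp, by simp, by simp, fun h => h⟩
  | cons q ns ih =>
    intro st
    rw [List.foldl_cons]
    by_cases hcnd : Pc grid c q ∧ q ∉ st.1
    · have hb : innerStep grid c st q = (st.1 ++ [q], st.2 ++ [q]) := by
        unfold innerStep
        rw [if_pos ((innerStep_cond grid c hc st q).mpr hcnd)]
        rw [PySem.Set.add_of_not_mem hcnd.2]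
      rw [hb]
      obtain ⟨added', h1, h2, h3, h4, h5⟩ := ih (st.1 ++ [q], st.2 ++ [q])
      refine ⟨q :: added', ?_, ?_, ?_, ?_, ?_⟩
      · rw [h1]; simp
      · rw [h2]; simp
      · intro r hrmem
        rcases List.mem_cons.mp hrmem with rfl | hr
        · exact ⟨List.mem_cons_self .., hcnd.1, hcnd.2⟩
        · obtain ⟨hns, hpc, hnm⟩ := h3 r hr
          exact ⟨List.mem_cons_of_mem _ hns, hpc, by
            intro hm
            exact hnm (by simp [hm])⟩
      · intro r hrmem
        rcases List.mem_cons.mp hrmem with rfl | hr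
        · intro _
          rw [h1]
          simp
        · exact fun hpc => h4 r hr hpc
      · intro hnd
        apply h5
        have hq : q ∉ st.1 := hcnd.2
        simp [List.nodup_append, hnd, hq, List.disjoint_singleton]
        rintro a b hab rfl
        exact hq hab
    · have hb : innerStep grid c st q = st := by
        unfold innerStep
        rw [if_neg ?_]
        intro hh
        exact hcnd ((innerStep_cond grid c hc st q).mp hh)
      rw [hb]
      obtain ⟨added', h1, h2, h3, h4, h5⟩ := ih st
      refine ⟨added', h1, h2, ?_, ?_, h5⟩
      · intro r hr
        obtain ⟨hns, hpc, hnm⟩ := h3 r hr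
        exact ⟨List.mem_cons_of_mem _ hns, hpc, hnm⟩
      · intro r hrmem
        rcases List.mem_cons.mp hrmem with rfl | hr
        · intro hpc
          have hrm : r ∈ st.1 := by
            by_contra hnm
            exact hcnd ⟨hpc, hnm⟩
          rw [h1]
          exact List.mem_append.mpr (Or.inl hrm)
        · exact fun hpc => h4 r hr hpc

-- the loop over the whole frontier
lemma outer_fold (grid : List (List String)) (c : String) (hc : c ≠ "") :
    ∀ (L : List (Nat × Nat)) (st : PySem.Set (Nat × Nat) × List (Nat × Nat)),
    ∃ added : List (Nat × Nat),
      (L.foldl (visitCell grid c) st).1 = st.1 ++ added ∧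
      (L.foldl (visitCell grid c) st).2 = st.2 ++ added ∧
      (∀ q ∈ added, Pc grid c q ∧ q ∉ st.1 ∧ ∃ r ∈ L, Step grid c r q) ∧
      (∀ r ∈ L, ∀ q, Step grid c r q → q ∈ (L.foldl (visitCell grid c) st).1) ∧
      (st.1.Nodup → (L.foldl (visitCell grid c) st).1.Nodup) := by
  intro L
  induction L with
  | nil =>
    intro st
    exact ⟨[], by simp, by simp, by simp, by simp, fun h => h⟩
  | cons p L ih =>
    intro st
    rw [List.foldl_cons, visitCell_eq]
    obtain ⟨a1, g1, g2, g3, g4, g5⟩ := inner_fold grid c hc (nbrsOf grid p.1 p.2) st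
    obtain ⟨a2, h1, h2, h3, h4, h5⟩ := ih ((nbrsOf grid p.1 p.2).foldl (innerStep grid c) st)
    refine ⟨a1 ++ a2, ?_, ?_, ?_, ?_, ?_⟩
    · rw [h1, g1, List.append_assoc]
    · rw [h2, g2, List.append_assoc]
    · intro q hq
      rcases List.mem_append.mp hq with hq1 | hq2
      · obtain ⟨hns, hpc, hnm⟩ := g3 q hq1
        exact ⟨hpc, hnm, p, List.mem_cons_self .., (step_iff_nbrs grid c hc p q).mpr ⟨hns, hpc⟩⟩
      · obtain ⟨hpc, hnm, r, hr, hstep⟩ := h3 q hq2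
        refine ⟨hpc, ?_, r, List.mem_cons_of_mem _ hr, hstep⟩
        intro hmem
        exact hnm (by rw [g1]; exact List.mem_append.mpr (Or.inl hmem))
    · intro r hrmem q hstep
      rcases List.mem_cons.mp hrmem with rfl | hr
      · obtain ⟨hnb, hpc⟩ := (step_iff_nbrs grid c hc r q).mp hstep
        have := g4 q hnb hpc
        rw [h1]
        exact List.mem_append.mpr (Or.inl this)
      · exact h4 r hr q hstep
    · intro hnd
      exact h5 (g5 hnd)

lemma bfs_nil (grid : List (List String)) (c : String) (m : PySem.Set (Nat × Nat)) :
    ∀ n, bfs grid c n m [] = m := by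
  intro n
  cases n with
  | zero => rfl
  | succ k => rfl

-- the BFS loop computes exactly the cells reachable from the seed
lemma bfs_spec (grid : List (List String)) (c : String) (hc : c ≠ "") (s : Nat × Nat) :
    ∀ (fuel : Nat) (m : PySem.Set (Nat × Nat)) (fr : List (Nat × Nat)),
      (cellsOf grid c).length + 1 ≤ fuel + m.length →
      m.Nodup → s ∈ m →
      (∀ p ∈ m, Pc grid c p) → (∀ p ∈ m, Reach grid c s p) →
      (∀ p ∈ fr, p ∈ m) →
      (∀ p ∈ m, p ∉ fr → ∀ q, Step grid c p q → q ∈ m) →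
      ∀ p, (p ∈ bfs grid c fuel m fr ↔ Reach grid c s p) := by
  intro fuel
  induction fuel with
  | zero =>
    intro m fr harith hnd hs hPc hReach hfrm hclosed p
    exfalso
    have hle : m.length ≤ (cellsOf grid c).length :=
      nodup_subset_length hnd (fun x hx => (mem_cellsOf grid c hc x).mpr (hPc x hx))
    omega
  | succ n ihf =>
    intro m fr harith hnd hs hPc hReach hfrm hclosed p
    show p ∈ (if fr.isEmpty then m else
        let st := fr.foldl (visitCell grid c) (m, [])
        bfs grid c n st.1 st.2) ↔ _
    by_cases hfr : fr.isEmpty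
    · rw [if_pos hfr]
      have hfrnil : fr = [] := List.isEmpty_iff.mp hfr
      subst hfrnil
      constructor
      · exact hReach p
      · exact reach_closed (· ∈ m) hs
          (fun r hr q hq => hclosed r hr (by simp) q hq) p
    · rw [if_neg hfr]
      show p ∈ bfs grid c n (fr.foldl (visitCell grid c) (m, [])).1
          (fr.foldl (visitCell grid c) (m, [])).2 ↔ _
      obtain ⟨added, h1, h2, h3, h4, h5⟩ := outer_fold grid c hc fr (m, [])
      simp only at h1 h2 h3 h4 h5
      rw [List.nil_append] at h2
      by_cases hadd : added = []
      · subst hadd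
        rw [List.append_nil] at h1
        rw [h2, h1, bfs_nil]
        constructor
        · exact hReach p
        · refine reach_closed (· ∈ m) hs ?_ p
          intro r hr q hq
          by_cases hrfr : r ∈ fr
          · have := h4 r hrfr q hq
            rwa [h1] at this
          · exact hclosed r hr hrfr q hq
      · rw [h2]
        apply ihf
        · rw [h1, List.length_append]
          have : 1 ≤ added.length := by
            cases added with
            | nil => exact absurd rfl hadd
            | cons a l => simp
          omega
        · exact h5 hnd
        · rw [h1]
          exact List.mem_append.mpr (Or.inl hs)
        · intro q hq
          rw [h1] at hq
          rcases List.mem_append.mp hq with hq1 | hq2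
          · exact hPc q hq1
          · exact (h3 q hq2).1
        · intro q hq
          rw [h1] at hq
          rcases List.mem_append.mp hq with hq1 | hq2
          · exact hReach q hq1
          · obtain ⟨-, -, r, hr, hstep⟩ := h3 q hq2
            exact Relation.ReflTransGen.tail (hReach r (hfrm r hr)) hstep
        · intro q hq
          rw [h1]
          exact List.mem_append.mpr (Or.inr hq)
        · intro q hq hqnfr r hstep
          rw [h1] at hq ⊢
          rcases List.mem_append.mp hq with hq1 | hq2
          · by_cases hqfr : q ∈ fr
            · have := h4 q hqfr r hstep
              rwa [h1] at this
            · exact List.mem_append.mpr (Or.inl (hclosed q hq1 hqfr r hstep))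
          · exact absurd hq2 hqnfr

-- ---------- per-character pass/fail of each port ----------
def charPassA (grid : List (List String)) (c : String) : Bool :=
  if (findC grid c).1 == -1 && (findC grid c).2 == -1 then true
  else !(badScan grid c (fillValue grid c (grid.length * pvRowLen grid 0 + 1)
    (pvTset (mkTable grid.length (pvRowLen grid 0)) (findC grid c).1.toNat
      (findC grid c).2.toNat) (findC grid c).1.toNat (findC grid c).2.toNat))

def charPassB (grid : List (List String)) (c : String) : Bool :=
  match cellsOf grid c with
  | [] => true
  | s :: rest =>
    (s :: rest).all fun p =>
      PySem.Set.contains (bfs grid c ((s :: rest).length + 2) (PySem.Set.ofList [s]) [s]) p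

lemma checkAux_cons (grid : List (List String)) (c : String) (cs : List String) :
    checkAux grid (c :: cs) = (charPassA grid c && checkAux grid cs) := by
  show (if (findC grid c).1 == -1 && (findC grid c).2 == -1 then checkAux grid cs
    else if badScan grid c (fillValue grid c (grid.length * pvRowLen grid 0 + 1)
      (pvTset (mkTable grid.length (pvRowLen grid 0)) (findC grid c).1.toNat
        (findC grid c).2.toNat) (findC grid c).1.toNat (findC grid c).2.toNat) then false
    else checkAux grid cs) = (charPassA grid c && checkAux grid cs)
  unfold charPassA
  by_cases h : ((findC grid c).1 == -1 && (findC grid c).2 == -1) = true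
  · rw [if_pos h, if_pos h]
    simp
  · rw [if_neg h, if_neg h]
    cases hb : badScan grid c (fillValue grid c (grid.length * pvRowLen grid 0 + 1)
      (pvTset (mkTable grid.length (pvRowLen grid 0)) (findC grid c).1.toNat
        (findC grid c).2.toNat) (findC grid c).1.toNat (findC grid c).2.toNat) <;>
      simp [hb]

lemma check_alt_eq (grid : List (List String)) :
    check_alt grid = ["a", "b", "c"].all (charPassB grid) := rfl

lemma ofList_singleton (s : Nat × Nat) : PySem.Set.ofList [s] = [s] :=
  PySem.Set.ofList_eq_self_of_nodup [s] (List.nodup_singleton s)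

-- both ports pass character c exactly when all its cells are reachable from the seed
lemma charPass_eq (grid : List (List String)) (c : String)
    (hrect : Rect grid) (hc : c ≠ "") :
    charPassA grid c = charPassB grid c := by
  unfold charPassA charPassB
  rw [findC_eq]
  cases hcell : cellsOf grid c with
  | nil =>
    simp [seedResult]
  | cons s rest =>
    have hPs : Pc grid c s := (mem_cellsOf grid c hc s).mp (hcell ▸ List.mem_cons_self ..)
    simp only [List.head?_cons, seedResult, Nat.zero_add]
    have hcond : (((s.1 : Nat) : Int) == -1 && ((s.2 : Nat) : Int) == -1) = false := by
      have : (((s.1 : Nat) : Int) == -1) = false := by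
        rw [beq_eq_false_iff_ne]
        omega
      rw [this, Bool.false_and]
    rw [hcond]
    simp only [Bool.false_eq_true, if_false, Int.toNat_natCast]
    -- A side characterisation
    have hAiff := A_marked_iff grid c hrect hc s hPs
    -- B side characterisation
    have hBiff := bfs_spec grid c hc s ((s :: rest).length + 2) (PySem.Set.ofList [s]) [s]
      (by rw [ofList_singleton, hcell]; simp)
      (by rw [ofList_singleton]; exact List.nodup_singleton s)
      (by rw [ofList_singleton]; exact List.mem_singleton.mpr rfl)
      (by
        rw [ofList_singleton]
        intro p hp
        rw [List.mem_singleton] at hp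
        subst hp
        exact hPs)
      (by
        rw [ofList_singleton]
        intro p hp
        rw [List.mem_singleton] at hp
        subst hp
        exact Relation.ReflTransGen.refl)
      (by rw [ofList_singleton]; exact fun p hp => hp)
      (by
        rw [ofList_singleton]
        intro p hp hnp
        exact absurd hp hnp)
    have hA : (!(badScan grid c (fillValue grid c (grid.length * pvRowLen grid 0 + 1)
        (pvTset (mkTable grid.length (pvRowLen grid 0)) s.1 s.2) s.1 s.2))) = true ↔
        (∀ p, Pc grid c p → Reach grid c s p) := by
      rw [Bool.not_eq_true']
      constructor
      · intro hfalse p hpc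
        by_contra hnr
        have : badScan grid c _ = true := (badScan_true_iff grid c _ hc).mpr
          ⟨p, hpc, by
            by_contra h0
            exact hnr ((hAiff p).mp h0)⟩
        rw [hfalse] at this
        cases this
      · intro hall
        rw [← Bool.not_eq_true, badScan_true_iff grid c _ hc]
        rintro ⟨p, hpc, h0⟩
        have : markedT (fillValue grid c (grid.length * pvRowLen grid 0 + 1)
            (pvTset (mkTable grid.length (pvRowLen grid 0)) s.1 s.2) s.1 s.2) p :=
          (hAiff p).mpr (hall p hpc)
        exact this h0
    have hB : ((s :: rest).all fun p =>
        PySem.Set.contains (bfs grid c ((s :: rest).length + 2)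
          (PySem.Set.ofList [s]) [s]) p) = true ↔
        (∀ p, Pc grid c p → Reach grid c s p) := by
      rw [List.all_eq_true]
      constructor
      · intro hall p hpc
        have hmem : p ∈ cellsOf grid c := (mem_cellsOf grid c hc p).mpr hpc
        rw [hcell] at hmem
        have := hall p hmem
        exact (hBiff p).mp ((PySem.Set.contains_iff _ _).mp this)
      · intro hall p hp
        have hpc : Pc grid c p := (mem_cellsOf grid c hc p).mp (hcell ▸ hp)
        exact (PySem.Set.contains_iff _ _).mpr ((hBiff p).mpr (hall p hpc))
    cases hAv : (!(badScan grid c (fillValue grid c (grid.length * pvRowLen grid 0 + 1)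
        (pvTset (mkTable grid.length (pvRowLen grid 0)) s.1 s.2) s.1 s.2))) <;>
      cases hBv : ((s :: rest).all fun p =>
        PySem.Set.contains (bfs grid c ((s :: rest).length + 2)
          (PySem.Set.ofList [s]) [s]) p)
    · rfl
    · exact absurd (hA.mpr (hB.mp hBv)) (by rw [hAv]; simp)
    · exact absurd (hB.mpr (hA.mp hAv)) (by rw [hBv]; simp)
    · rfl

-- a grid with no 'a'/'b'/'c' anywhere has no c-cells
lemma noabc_no_cells (grid : List (List String)) (c : String)
    (hno : ∀ row ∈ grid, ∀ x ∈ row, ¬(x = "a" ∨ x = "b" ∨ x = "c"))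
    (hc3 : c = "a" ∨ c = "b" ∨ c = "c") : cellsOf grid c = [] := by
  have hc : c ≠ "" := by rcases hc3 with rfl | rfl | rfl <;> decide
  rw [List.eq_nil_iff_forall_not_mem]
  intro p hp
  have hpc : Pc grid c p := (mem_cellsOf grid c hc p).mp hp
  have hb := pc_lt hc hpc
  have hrow : grid.getD p.1 [] ∈ grid := by
    rw [List.getD_eq_getElem?_getD, List.getElem?_eq_getElem hb.1]
    exact List.getElem_mem hb.1
  have hx : (grid.getD p.1 []).getD p.2 "" ∈ grid.getD p.1 [] := by
    have hgen : ∀ (row : List String), p.2 < row.length → row.getD p.2 "" ∈ row := by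
      intro row h
      rw [List.getD_eq_getElem?_getD, List.getElem?_eq_getElem h]
      exact List.getElem_mem h
    exact hgen _ hb.2
  have := hno _ hrow _ hx
  unfold Pc pvCell at hpc
  rw [hpc] at this
  exact this hc3

lemma charPass_eq_of_noabc (grid : List (List String)) (c : String)
    (hno : ∀ row ∈ grid, ∀ x ∈ row, ¬(x = "a" ∨ x = "b" ∨ x = "c"))
    (hc3 : c = "a" ∨ c = "b" ∨ c = "c") :
    charPassA grid c = charPassB grid c := by
  have hnil := noabc_no_cells grid c hno hc3
  unfold charPassA charPassB
  rw [findC_eq, hnil]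
  simp [seedResult]

-- ===== VERDICT (by name: the statement is the Claim_ definition above) =====
theorem check_spec : Claim_equal_check := by
  unfold Claim_equal_check
  intro grid _ hpre
  unfold Spec_check
  have hpass : ∀ c, (c = "a" ∨ c = "b" ∨ c = "c") → charPassA grid c = charPassB grid c := by
    intro c hc3
    rcases hpre with hrect | hno
    · exact charPass_eq grid c hrect (by rcases hc3 with rfl | rfl | rfl <;> decide)
    · exact charPass_eq_of_noabc grid c hno hc3
  show check grid = check_alt grid
  rw [check_alt_eq]
  show checkAux grid ["a", "b", "c"] = _
  rw [checkAux_cons, checkAux_cons, checkAux_cons]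
  rw [hpass "a" (Or.inl rfl), hpass "b" (Or.inr (Or.inl rfl)),
    hpass "c" (Or.inr (Or.inr rfl))]
  simp [List.all_cons]
  have hnil : checkAux grid [] = true := rfl
  rw [hnil, Bool.and_true]
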